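-- pv_equiv track=rewrite | github.com/konstantinasfr/GirkAnalyzer | analysis/asn_axis_analysis.py | _sort_residues
-- ===== SOURCE A (Python) =====
-- PANEL_ORDER = ["184.B", "184.C", "184.A", "173.G1"]
--
-- def _sort_residues(asn_residues, pdb_labels):
--     """Sort residues by the fixed PANEL_ORDER for consistent plot layout."""
--     labeled = [(r, pdb_labels[r]) for r in asn_residues if r in pdb_labels]
--     def sort_key(item):
--         try:
--             return PANEL_ORDER.index(item[1])
--         except ValueError:
--             return 999  # unknown labels go last
--     return [r for r, _ in sorted(labeled, key=sort_key)]
-- ===== SOURCE B (Python) =====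
-- PANEL_ORDER = ["184.B", "184.C", "184.A", "173.G1"]
--
-- def _sort_residues(asn_residues, pdb_labels):
--     """Bucket pass: no sorting needed, the key has only 5 possible values."""
--     known = [r for r in asn_residues if r in pdb_labels]
--     out = []
--     for label in PANEL_ORDER:
--         out.extend(r for r in known if pdb_labels[r] == label)
--     out.extend(r for r in known if pdb_labels[r] not in PANEL_ORDER)
--     return out
-- ===== Notes on version B (the rewrite author's own statement) =====
-- stated objective: simpler
-- what changed: Replaced the stable sort by PANEL_ORDER.index key with a sort-free bucket pass: one scan per panel label collecting matching residues in original order, then one scan for unknown labels appended last.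
import Mathlib
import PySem

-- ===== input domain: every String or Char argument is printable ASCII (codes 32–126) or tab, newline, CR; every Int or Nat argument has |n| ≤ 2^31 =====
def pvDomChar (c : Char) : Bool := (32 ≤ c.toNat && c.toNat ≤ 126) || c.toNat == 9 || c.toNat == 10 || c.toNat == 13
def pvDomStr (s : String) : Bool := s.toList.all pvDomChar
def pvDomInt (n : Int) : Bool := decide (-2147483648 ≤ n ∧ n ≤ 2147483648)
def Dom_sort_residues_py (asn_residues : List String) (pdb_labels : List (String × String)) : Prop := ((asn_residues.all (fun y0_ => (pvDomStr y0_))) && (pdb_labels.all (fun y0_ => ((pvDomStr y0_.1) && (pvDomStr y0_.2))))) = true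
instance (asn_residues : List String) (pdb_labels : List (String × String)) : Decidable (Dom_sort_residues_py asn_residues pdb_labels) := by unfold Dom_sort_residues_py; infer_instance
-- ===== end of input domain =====

-- B replaces A's stable sort-by-panel-index with a single bucket-then-concatenate pass (objective: simpler; same observable result).

def PANEL_ORDER : List String := ["184.B", "184.C", "184.A", "173.G1"]

-- ===== PORT A =====
-- A's inner sort_key: PANEL_ORDER.index(label), ValueError -> 999
def pySortKey (item : String × String) : Int :=
  match PySem.List.index? PANEL_ORDER item.2 with
  | some i => (i : Int)
  | none => 999

def sort_residues_py (asn_residues : List String) (pdb_labels : List (String × String)) : List String :=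
  let d := PySem.Dict.mk pdb_labels
  let labeled := asn_residues.filterMap (fun r =>
    match d.get? r with
    | some v => some (r, v)
    | none => none)
  (PySem.List.sorted labeled pySortKey).map (fun p => p.1)

-- ===== PORT B =====
def sort_residues_py_alt (asn_residues : List String) (pdb_labels : List (String × String)) : List String :=
  let d := PySem.Dict.mk pdb_labels
  let known := asn_residues.filter (fun r => (d.get? r).isSome)
  let out := PANEL_ORDER.foldl (fun acc label =>
      acc ++ known.filter (fun r => (d.get? r).getD "" == label)) []
  out ++ known.filter (fun r => !(PANEL_ORDER.contains ((d.get? r).getD "")))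

-- ===== PRECONDITION & SPEC =====
def Spec_sort_residues_py (asn_residues : List String) (pdb_labels : List (String × String)) (out : List String) : Prop := out = sort_residues_py_alt asn_residues pdb_labels
instance (asn_residues : List String) (pdb_labels : List (String × String)) (out : List String) : Decidable (Spec_sort_residues_py asn_residues pdb_labels out) := by unfold Spec_sort_residues_py; infer_instance

-- ===== CLAIM (what is proved, stated in full; the proofs are below) =====
def Claim_equal_sort_residues_py : Prop := ∀ (asn_residues : List String) (pdb_labels : List (String × String)), Dom_sort_residues_py asn_residues pdb_labels → Spec_sort_residues_py asn_residues pdb_labels (sort_residues_py asn_residues pdb_labels)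

-- ===== LEMMAS AND PROOFS =====

-- the five buckets a stable sort under pySortKey produces, in key order
def pvBuckets (l : List (String × String)) : List (String × String) :=
  l.filter (fun p => pySortKey p == 0) ++ l.filter (fun p => pySortKey p == 1) ++
  l.filter (fun p => pySortKey p == 2) ++ l.filter (fun p => pySortKey p == 3) ++
  l.filter (fun p => pySortKey p == 999)

theorem pySortKey_cases (p : String × String) :
    pySortKey p = 0 ∨ pySortKey p = 1 ∨ pySortKey p = 2 ∨ pySortKey p = 3 ∨ pySortKey p = 999 := by
  unfold pySortKey
  cases h : PySem.List.index? PANEL_ORDER p.2 with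
  | none => simp
  | some i =>
      rcases (PySem.List.index?_eq_some_iff _ _ _).mp h with ⟨pre, suf, heq, hlen, -⟩
      have : i < 4 := by
        have := congrArg List.length heq
        simp [PANEL_ORDER] at this
        omega
      interval_cases i <;> simp

theorem insertBy_bucket (x : String × String) (A B : List (String × String))
    (hA : ∀ a ∈ A, pySortKey a ≤ pySortKey x) (hB : ∀ b ∈ B, pySortKey x < pySortKey b) :
    PySem.List.insertBy (fun a b => decide (pySortKey a < pySortKey b)) x (A ++ B) = A ++ x :: B := by
  induction A with
  | nil =>
      cases B with
      | nil => rfl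
      | cons b B' =>
          have : pySortKey x < pySortKey b := hB b (by simp)
          simp [PySem.List.insertBy, this]
  | cons a A' ih =>
      have ha : ¬ pySortKey x < pySortKey a := not_lt.mpr (hA a (by simp))
      simp only [List.cons_append, PySem.List.insertBy, ha, decide_false, Bool.false_eq_true,
        if_false]
      rw [ih (fun a ha' => hA a (by simp [ha']))]

theorem mem_filter_key (l : List (String × String)) (v : Int) (a : String × String)
    (h : a ∈ l.filter (fun p => pySortKey p == v)) : pySortKey a = v := by
  have := (List.mem_filter.mp h).2
  simpa using this

theorem sorted_eq_buckets (l : List (String × String)) :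
    PySem.List.sorted l pySortKey = pvBuckets l := by
  rw [PySem.List.sorted_eq_foldl_insertBy]
  induction l using List.reverseRecOn with
  | nil => rfl
  | append_singleton l x ih =>
      rw [List.foldl_append, List.foldl_cons, List.foldl_nil, ih]
      unfold pvBuckets
      simp only [List.filter_append]
      rcases pySortKey_cases x with h | h | h | h | h <;>
        simp only [List.filter_cons, List.filter_nil, h] <;> norm_num
      · rw [insertBy_bucket x (l.filter (fun p => pySortKey p == 0))
            (l.filter (fun p => pySortKey p == 1) ++ (l.filter (fun p => pySortKey p == 2) ++
             (l.filter (fun p => pySortKey p == 3) ++ l.filter (fun p => pySortKey p == 999))))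
            (fun a ha => by have := mem_filter_key _ _ _ ha; omega)
            (fun b hb => by
              rcases List.mem_append.mp hb with h1 | h1
              · have := mem_filter_key _ _ _ h1; omega
              rcases List.mem_append.mp h1 with h2 | h2
              · have := mem_filter_key _ _ _ h2; omega
              rcases List.mem_append.mp h2 with h3 | h3
              · have := mem_filter_key _ _ _ h3; omega
              · have := mem_filter_key _ _ _ h3; omega)]
      · rw [show l.filter (fun p => pySortKey p == 0) ++ (l.filter (fun p => pySortKey p == 1) ++
              (l.filter (fun p => pySortKey p == 2) ++ (l.filter (fun p => pySortKey p == 3) ++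
               l.filter (fun p => pySortKey p == 999))))
            = (l.filter (fun p => pySortKey p == 0) ++ l.filter (fun p => pySortKey p == 1)) ++
              (l.filter (fun p => pySortKey p == 2) ++ (l.filter (fun p => pySortKey p == 3) ++
               l.filter (fun p => pySortKey p == 999))) from by simp,
           insertBy_bucket x _ _
            (fun a ha => by
              rcases List.mem_append.mp ha with h1 | h1 <;>
                · have := mem_filter_key _ _ _ h1; omega)
            (fun b hb => by
              rcases List.mem_append.mp hb with h1 | h1
              · have := mem_filter_key _ _ _ h1; omega
              rcases List.mem_append.mp h1 with h2 | h2
              · have := mem_filter_key _ _ _ h2; omega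
              · have := mem_filter_key _ _ _ h2; omega)]
        all_goals simp
      · rw [show l.filter (fun p => pySortKey p == 0) ++ (l.filter (fun p => pySortKey p == 1) ++
              (l.filter (fun p => pySortKey p == 2) ++ (l.filter (fun p => pySortKey p == 3) ++
               l.filter (fun p => pySortKey p == 999))))
            = (l.filter (fun p => pySortKey p == 0) ++ (l.filter (fun p => pySortKey p == 1) ++
               l.filter (fun p => pySortKey p == 2))) ++
              (l.filter (fun p => pySortKey p == 3) ++ l.filter (fun p => pySortKey p == 999))
            from by simp,
           insertBy_bucket x _ _
            (fun a ha => by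
              rcases List.mem_append.mp ha with h1 | h1
              · have := mem_filter_key _ _ _ h1; omega
              rcases List.mem_append.mp h1 with h2 | h2 <;>
                · have := mem_filter_key _ _ _ h2; omega)
            (fun b hb => by
              rcases List.mem_append.mp hb with h1 | h1 <;>
                · have := mem_filter_key _ _ _ h1; omega)]
        all_goals simp
      · rw [show l.filter (fun p => pySortKey p == 0) ++ (l.filter (fun p => pySortKey p == 1) ++
              (l.filter (fun p => pySortKey p == 2) ++ (l.filter (fun p => pySortKey p == 3) ++
               l.filter (fun p => pySortKey p == 999))))
            = (l.filter (fun p => pySortKey p == 0) ++ (l.filter (fun p => pySortKey p == 1) ++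
               (l.filter (fun p => pySortKey p == 2) ++ l.filter (fun p => pySortKey p == 3)))) ++
              l.filter (fun p => pySortKey p == 999)
            from by simp,
           insertBy_bucket x _ _
            (fun a ha => by
              rcases List.mem_append.mp ha with h1 | h1
              · have := mem_filter_key _ _ _ h1; omega
              rcases List.mem_append.mp h1 with h2 | h2
              · have := mem_filter_key _ _ _ h2; omega
              rcases List.mem_append.mp h2 with h3 | h3 <;>
                · have := mem_filter_key _ _ _ h3; omega)
            (fun b hb => by have := mem_filter_key _ _ _ hb; omega)]
        all_goals simp
      · rw [show l.filter (fun p => pySortKey p == 0) ++ (l.filter (fun p => pySortKey p == 1) ++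
              (l.filter (fun p => pySortKey p == 2) ++ (l.filter (fun p => pySortKey p == 3) ++
               l.filter (fun p => pySortKey p == 999))))
            = (l.filter (fun p => pySortKey p == 0) ++ (l.filter (fun p => pySortKey p == 1) ++
               (l.filter (fun p => pySortKey p == 2) ++ (l.filter (fun p => pySortKey p == 3) ++
                l.filter (fun p => pySortKey p == 999))))) ++ [] from by simp,
           insertBy_bucket x _ []
            (fun a ha => by
              rcases List.mem_append.mp ha with h1 | h1
              · have := mem_filter_key _ _ _ h1; omega
              rcases List.mem_append.mp h1 with h2 | h2
              · have := mem_filter_key _ _ _ h2; omega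
              rcases List.mem_append.mp h2 with h3 | h3
              · have := mem_filter_key _ _ _ h3; omega
              rcases List.mem_append.mp h3 with h4 | h4 <;>
                · have := mem_filter_key _ _ _ h4; omega)
            (fun b hb => by simp at hb)]
        all_goals simp


theorem labeled_eq (d : PySem.Dict String String) (asn : List String) :
    asn.filterMap (fun r => match d.get? r with | some v => some (r, v) | none => none)
    = (asn.filter (fun r => (d.get? r).isSome)).map (fun r => (r, (d.get? r).getD "")) := by
  induction asn with
  | nil => rfl
  | cons r t ih => cases h : d.get? r <;> simp [h, ih]

theorem index?_panel (s : String) :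
    PySem.List.index? PANEL_ORDER s =
      if s = "184.B" then some 0 else if s = "184.C" then some 1 else if s = "184.A" then some 2
      else if s = "173.G1" then some 3 else none := by
  split_ifs with h1 h2 h3 h4
  · subst h1; decide
  · subst h2; decide
  · subst h3; decide
  · subst h4; decide
  · exact (PySem.List.index?_eq_none_iff _ _).mpr (by simp [PANEL_ORDER, h1, h2, h3, h4])

theorem key_eq_zero (p : String × String) : (pySortKey p == (0 : Int)) = (p.2 == "184.B") := by
  simp only [pySortKey, index?_panel]
  split_ifs <;> simp_all

theorem key_eq_one (p : String × String) : (pySortKey p == (1 : Int)) = (p.2 == "184.C") := by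
  simp only [pySortKey, index?_panel]
  split_ifs <;> simp_all

theorem key_eq_two (p : String × String) : (pySortKey p == (2 : Int)) = (p.2 == "184.A") := by
  simp only [pySortKey, index?_panel]
  split_ifs <;> simp_all

theorem key_eq_three (p : String × String) : (pySortKey p == (3 : Int)) = (p.2 == "173.G1") := by
  simp only [pySortKey, index?_panel]
  split_ifs <;> simp_all

theorem key_eq_last (p : String × String) :
    (pySortKey p == (999 : Int)) = !(PANEL_ORDER.contains p.2) := by
  simp only [pySortKey, index?_panel]
  split_ifs <;> simp_all [PANEL_ORDER]

theorem sort_residues_py_spec : Claim_equal_sort_residues_py := by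
  intro asn pdb _
  unfold Spec_sort_residues_py sort_residues_py sort_residues_py_alt
  simp only [labeled_eq, sorted_eq_buckets, pvBuckets, List.filter_map, List.map_append,
    List.map_map, Function.comp_def, key_eq_zero, key_eq_one, key_eq_two, key_eq_three,
    key_eq_last]
  simp [PANEL_ORDER, List.append_assoc]
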